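-- pv_equiv track=rewrite | github.com/cnvogelg/aman | aman/parse.py | remove_empty_sec_lines
-- ===== SOURCE A (Python) =====
-- def remove_empty_sec_lines(sec_lines):
--     """remove empty lines at end and at the beginning"""
--     result = []
--     # empty?
--     if len(sec_lines) == 0:
--         return result
--
--     # first non-empty
--     begin = 0
--     for line in sec_lines:
--         if len(line) > 0:
--             break
--         begin += 1
--
--     # last non empty
--     last = len(sec_lines) - 1
--     for line in reversed(sec_lines):
--         if len(line) > 0:
--             break
--         last -= 1
--
--     return sec_lines[begin : last + 1]
-- ===== SOURCE B (Python) =====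
-- def remove_empty_sec_lines(sec_lines):
--     """remove empty lines at end and at the beginning"""
--     idx = [i for i, line in enumerate(sec_lines) if len(line) > 0]
--     if not idx:
--         return []
--     return sec_lines[idx[0]:idx[-1] + 1]
-- ===== Notes on version B (the rewrite author's own statement) =====
-- stated objective: simpler
-- what changed: Replaced A's two opposite-end short-circuiting scans (forward for the first non-empty line, backward over reversed(sec_lines) for the last) by one forward enumerate pass collecting all non-empty indices, then slicing from the first to the last collected index.
import Mathlib
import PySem

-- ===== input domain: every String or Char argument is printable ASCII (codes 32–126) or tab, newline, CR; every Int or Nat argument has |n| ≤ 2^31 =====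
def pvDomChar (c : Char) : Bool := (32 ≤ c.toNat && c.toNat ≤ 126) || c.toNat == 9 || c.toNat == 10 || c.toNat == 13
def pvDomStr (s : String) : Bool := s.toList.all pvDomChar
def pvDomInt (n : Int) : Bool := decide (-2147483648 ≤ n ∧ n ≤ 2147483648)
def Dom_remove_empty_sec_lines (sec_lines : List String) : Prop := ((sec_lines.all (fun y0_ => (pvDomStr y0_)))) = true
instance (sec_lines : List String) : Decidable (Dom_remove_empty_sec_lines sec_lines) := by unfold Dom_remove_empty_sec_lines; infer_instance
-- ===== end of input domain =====

-- B: one forward enumerate pass collecting the non-empty indices, then a single slice (simpler decomposition, same O(n)).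
-- ===== PORT A =====
-- the 'for … break' counting loops of A: number of leading empty lines (stops at the first non-empty)
def pvScanEmpty : List String → Int
  | [] => 0
  | l :: ls => if PySem.Str.len l > 0 then 0 else pvScanEmpty ls + 1

def remove_empty_sec_lines (sec_lines : List String) : List String :=
  if sec_lines.length = 0 then []
  else
    let begin_ : Int := pvScanEmpty sec_lines
    let last : Int := (sec_lines.length : Int) - 1 - pvScanEmpty sec_lines.reverse
    PySem.List.slice sec_lines (some begin_) (some (last + 1))

-- ===== PORT B =====
def remove_empty_sec_lines_alt (sec_lines : List String) : List String :=
  let idx := (PySem.List.enumerate sec_lines 0).filterMap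
      (fun p => if PySem.Str.len p.2 > 0 then some p.1 else none)
  match idx with
  | [] => []
  | i :: rest => PySem.List.slice sec_lines (some i) (some (rest.getLastD i + 1))

-- ===== PRECONDITION & SPEC =====
def Spec_remove_empty_sec_lines (sec_lines : List String) (out : List String) : Prop := out = remove_empty_sec_lines_alt sec_lines
instance (sec_lines : List String) (out : List String) : Decidable (Spec_remove_empty_sec_lines sec_lines out) := by unfold Spec_remove_empty_sec_lines; infer_instance

-- ===== CLAIM (what is proved, stated in full; the proofs are below) =====
def Claim_equal_remove_empty_sec_lines : Prop := ∀ (sec_lines : List String), Dom_remove_empty_sec_lines sec_lines → Spec_remove_empty_sec_lines sec_lines (remove_empty_sec_lines sec_lines)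

-- ===== LEMMAS AND PROOFS =====

-- ===== VERDICT (by name: the statement is the Claim_ definition above) =====
def pvIdx (s : Int) (xs : List String) : List Int :=
  (PySem.List.enumerate xs s).filterMap (fun p => if PySem.Str.len p.2 > 0 then some p.1 else none)

theorem pvGetLast?_cons_ne {α : Type} (a : α) (l : List α) (h : l ≠ []) :
    (a :: l).getLast? = l.getLast? := by
  cases l with
  | nil => exact absurd rfl h
  | cons b t => simp

theorem pvIdx_cons (s : Int) (x : String) (xs : List String) :
    pvIdx s (x :: xs) = if PySem.Str.len x > 0 then s :: pvIdx (s+1) xs else pvIdx (s+1) xs := by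
  by_cases hx : PySem.Str.len x > 0 <;>
    simp only [pvIdx, PySem.List.enumerate_cons, List.filterMap_cons, if_pos, hx, if_false]

theorem scan_eq_len (xs : List String) (h : ∀ x ∈ xs, ¬ PySem.Str.len x > 0) :
    pvScanEmpty xs = (xs.length : Int) := by
  induction xs with
  | nil => simp [pvScanEmpty]
  | cons x xs ih =>
      have hx := h x (by simp)
      simp only [pvScanEmpty, if_neg hx, ih (fun y hy => h y (by simp [hy])), List.length_cons]
      push_cast; omega

theorem pvIdx_nil_of_all_empty (s : Int) (xs : List String) (h : ∀ x ∈ xs, ¬ PySem.Str.len x > 0) :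
    pvIdx s xs = [] := by
  induction xs generalizing s with
  | nil => simp [pvIdx]
  | cons x xs ih =>
      rw [pvIdx_cons, if_neg (h x (by simp))]
      exact ih _ (fun y hy => h y (by simp [hy]))

theorem scan_append_of_ex (ys zs : List String) (h : ∃ y ∈ ys, PySem.Str.len y > 0) :
    pvScanEmpty (ys ++ zs) = pvScanEmpty ys := by
  induction ys with
  | nil => simp at h
  | cons y ys ih =>
      by_cases hy : PySem.Str.len y > 0
      · simp only [List.cons_append, pvScanEmpty, if_pos hy]
      · have hex : ∃ z ∈ ys, PySem.Str.len z > 0 := by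
          rcases h with ⟨z, hz, hzp⟩
          rcases List.mem_cons.mp hz with rfl | hz'
          · exact absurd hzp hy
          · exact ⟨z, hz', hzp⟩
        simp only [List.cons_append, pvScanEmpty, if_neg hy, ih hex]

theorem scan_append_all (ys zs : List String) (h : ∀ y ∈ ys, ¬ PySem.Str.len y > 0) :
    pvScanEmpty (ys ++ zs) = (ys.length : Int) + pvScanEmpty zs := by
  induction ys with
  | nil => simp
  | cons y ys ih =>
      simp only [List.cons_append, pvScanEmpty, if_neg (h y (by simp)),
        ih (fun z hz => h z (by simp [hz])), List.length_cons]
      push_cast; omega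

theorem pvIdx_spec (xs : List String) (s : Int) (h : ∃ x ∈ xs, PySem.Str.len x > 0) :
    (pvIdx s xs).head? = some (s + pvScanEmpty xs) ∧
    (pvIdx s xs).getLast? = some (s + (xs.length : Int) - 1 - pvScanEmpty xs.reverse) := by
  induction xs generalizing s with
  | nil => simp at h
  | cons x xs ih =>
      by_cases hx : PySem.Str.len x > 0
      · rw [pvIdx_cons, if_pos hx]
        by_cases hex : ∃ y ∈ xs, PySem.Str.len y > 0
        · obtain ⟨_, hlast⟩ := ih (s+1) hex
          have hne : pvIdx (s+1) xs ≠ [] := by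
            intro hnil; rw [hnil] at hlast; simp at hlast
          constructor
          · simp only [List.head?_cons, pvScanEmpty, if_pos hx, add_zero]
          · rw [pvGetLast?_cons_ne _ _ hne, hlast]
            have hsc : pvScanEmpty (xs.reverse ++ [x]) = pvScanEmpty xs.reverse := by
              apply scan_append_of_ex
              rcases hex with ⟨y, hy, hyp⟩
              exact ⟨y, List.mem_reverse.mpr hy, hyp⟩
            rw [List.reverse_cons, hsc]
            congr 1
            simp only [List.length_cons]; push_cast; omega
        · push_neg at hex
          have hnil := pvIdx_nil_of_all_empty (s+1) xs
            (fun y hy => not_lt.mpr (hex y hy))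
          rw [hnil]
          constructor
          · simp only [List.head?_cons, pvScanEmpty, if_pos hx, add_zero]
          · have hsc : pvScanEmpty (xs.reverse ++ [x]) = (xs.length : Int) := by
              rw [scan_append_all _ _ (fun y hy => not_lt.mpr (hex y (List.mem_reverse.mp hy)))]
              simp only [pvScanEmpty, if_pos hx, List.length_reverse]; omega
            rw [List.reverse_cons, hsc]
            simp only [List.getLast?_singleton, Option.some.injEq, List.length_cons]
            push_cast; omega
      · have hex : ∃ y ∈ xs, PySem.Str.len y > 0 := by
          rcases h with ⟨z, hz, hzp⟩
          rcases List.mem_cons.mp hz with rfl | hz'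
          · exact absurd hzp hx
          · exact ⟨z, hz', hzp⟩
        obtain ⟨hhead, hlast⟩ := ih (s+1) hex
        rw [pvIdx_cons, if_neg hx]
        have hsc : pvScanEmpty (xs.reverse ++ [x]) = pvScanEmpty xs.reverse := by
          apply scan_append_of_ex
          rcases hex with ⟨y, hy, hyp⟩
          exact ⟨y, List.mem_reverse.mpr hy, hyp⟩
        constructor
        · rw [hhead]
          simp only [Option.some.injEq, pvScanEmpty, if_neg hx]; omega
        · rw [hlast, List.reverse_cons, hsc]
          congr 1
          simp only [List.length_cons]; push_cast; omega

-- ===== VERDICT =====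
theorem remove_empty_sec_lines_spec : Claim_equal_remove_empty_sec_lines := by
  intro xs _
  unfold Spec_remove_empty_sec_lines remove_empty_sec_lines remove_empty_sec_lines_alt
  show _ = (match pvIdx 0 xs with
    | [] => []
    | i :: rest => PySem.List.slice xs (some i) (some (rest.getLastD i + 1)))
  by_cases hex : ∃ x ∈ xs, PySem.Str.len x > 0
  · have hxs : ¬ xs.length = 0 := by
      rcases hex with ⟨x, hx, _⟩
      intro h0; rw [List.length_eq_zero_iff] at h0; subst h0; simp at hx
    obtain ⟨hhead, hlast⟩ := pvIdx_spec xs 0 hex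
    rw [if_neg hxs]
    cases hidx : pvIdx 0 xs with
    | nil => rw [hidx] at hhead; simp at hhead
    | cons i rest =>
        rw [hidx] at hhead hlast
        simp only [List.head?_cons, Option.some.injEq] at hhead
        have hgl : (i :: rest).getLast? = some (rest.getLastD i) := by
          cases rest with
          | nil => simp
          | cons r rs =>
              rw [pvGetLast?_cons_ne _ _ (by simp)]
              obtain ⟨y, hy⟩ := Option.isSome_iff_exists.mp
                (List.getLast?_isSome.mpr (List.cons_ne_nil r rs))
              rw [hy, List.getLastD_eq_getLast?, hy]
              rfl
        rw [hgl] at hlast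
        simp only [Option.some.injEq] at hlast
        show PySem.List.slice xs (some (pvScanEmpty xs))
            (some ((xs.length : Int) - 1 - pvScanEmpty xs.reverse + 1)) =
          PySem.List.slice xs (some i) (some (rest.getLastD i + 1))
        have h1 : pvScanEmpty xs = i := by omega
        have h2 : rest.getLastD i + 1 = (xs.length : Int) - 1 - pvScanEmpty xs.reverse + 1 := by
          omega
        rw [h1, h2]
  · push_neg at hex
    have hner : ∀ x ∈ xs, ¬ PySem.Str.len x > 0 := fun x hx => not_lt.mpr (hex x hx)
    have hnil : pvIdx 0 xs = [] := pvIdx_nil_of_all_empty 0 xs hner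
    rw [hnil]
    by_cases h0 : xs.length = 0
    · rw [if_pos h0]
    · rw [if_neg h0]
      have h1 : pvScanEmpty xs = (xs.length : Int) := scan_eq_len xs hner
      have h2 : pvScanEmpty xs.reverse = (xs.length : Int) := by
        rw [scan_eq_len _ (fun x hx => hner x (List.mem_reverse.mp hx))]
        simp
      show PySem.List.slice xs (some (pvScanEmpty xs))
          (some ((xs.length : Int) - 1 - pvScanEmpty xs.reverse + 1)) = []
      rw [h1, h2]
      have hb : (xs.length : Int) - 1 - (xs.length : Int) + 1 = ((0:Nat) : Int) := by omega
      rw [hb, PySem.List.slice_natCast]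
      simp
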